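-- pv_equiv track=rewrite | github.com/mrfloki16/univ | cs50p/week5/pset5/test_plates/plates.py | good_num
-- ===== SOURCE A (Python) =====
-- def good_num(s):
--   num = 0
--   char = [x for x in s]
--   for x in range(len(char)):
--     if char[x] == "0" and num == 0:
--       return False
--     elif char[x].isnumeric():
--       num = num + 1
--     elif char[x].isalpha() and num > 0:
--       return False
--   return True
-- ===== SOURCE B (Python) =====
-- def good_num(s):
--     # Scan for the first numeric character; the suffix after it decides everything.
--     for i, c in enumerate(s):
--         if c.isnumeric():
--             return c != "0" and not any(x.isalpha() for x in s[i+1:])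
--     return True
-- ===== Notes on version B (the rewrite author's own statement) =====
-- stated objective: simpler
-- what changed: Replaces the digit-counter state machine that keeps scanning past every digit with an early-exit search for the first digit followed by a single any()-scan of the suffix for letters.
import Mathlib
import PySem

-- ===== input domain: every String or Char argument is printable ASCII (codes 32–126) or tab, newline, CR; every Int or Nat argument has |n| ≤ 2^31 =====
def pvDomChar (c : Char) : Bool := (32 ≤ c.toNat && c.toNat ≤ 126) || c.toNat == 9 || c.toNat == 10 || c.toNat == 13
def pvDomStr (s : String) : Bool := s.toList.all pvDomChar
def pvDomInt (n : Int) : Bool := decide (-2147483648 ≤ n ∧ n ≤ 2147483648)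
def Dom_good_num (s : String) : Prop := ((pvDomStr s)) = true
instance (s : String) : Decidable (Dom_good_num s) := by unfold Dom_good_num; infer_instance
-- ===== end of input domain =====

-- B replaces A's digit-counter state machine with an early-exit first-digit search plus a suffix any()-scan for letters (objective: simpler).


-- ===== PORT A =====
-- Python's isnumeric coincides with isdigit on the printable-ASCII domain Dom_good_num.
def goodNumLoopA : List Char → Nat → Bool
  | [], _ => true
  | c :: rest, num =>
    if c = '0' ∧ num = 0 then false
    else if PySem.Chars.isdigit c then goodNumLoopA rest (num + 1)
    else if PySem.Chars.isalpha c ∧ num > 0 then false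
    else goodNumLoopA rest num

def good_num (s : String) : Bool := goodNumLoopA s.toList 0

-- ===== PORT B =====
def goodNumScanB : List Char → Bool
  | [] => true
  | c :: rest =>
    if PySem.Chars.isdigit c then (c != '0') && !(rest.any PySem.Chars.isalpha)
    else goodNumScanB rest

def good_num_alt (s : String) : Bool := goodNumScanB s.toList

-- ===== PRECONDITION & SPEC =====
def Spec_good_num (s : String) (out : Bool) : Prop := out = good_num_alt s
instance (s : String) (out : Bool) : Decidable (Spec_good_num s out) := by unfold Spec_good_num; infer_instance

-- ===== CLAIM (what is proved, stated in full; the proofs are below) =====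
def Claim_equal_good_num : Prop := ∀ (s : String), Dom_good_num s → Spec_good_num s (good_num s)

-- ===== LEMMAS AND PROOFS =====

theorem isalpha_of_isdigit (c : Char) (h : PySem.Chars.isdigit c = true) :
    PySem.Chars.isalpha c = false := by
  unfold PySem.Chars.isdigit at h
  unfold PySem.Chars.isalpha PySem.Chars.isupper PySem.Chars.islower
  simp only [Bool.and_eq_true, Bool.or_eq_false_iff, Bool.and_eq_false_iff,
    decide_eq_true_eq, decide_eq_false_iff_not, Char.le_def, UInt32.le_iff_toNat_le,
    show ('0'.val.toNat = 48) from rfl, show ('9'.val.toNat = 57) from rfl,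
    show ('A'.val.toNat = 65) from rfl, show ('Z'.val.toNat = 90) from rfl,
    show ('a'.val.toNat = 97) from rfl, show ('z'.val.toNat = 122) from rfl] at h ⊢
  omega

-- Once a digit has been seen (counter ≥ 1), A returns true iff no letter remains.
theorem goodNumLoopA_pos (l : List Char) (n : Nat) :
    goodNumLoopA l (n + 1) = !(l.any PySem.Chars.isalpha) := by
  induction l generalizing n with
  | nil => simp [goodNumLoopA]
  | cons c rest ih =>
    by_cases hd : PySem.Chars.isdigit c = true
    · simp [goodNumLoopA, hd, isalpha_of_isdigit c hd, ih]
    · by_cases ha : PySem.Chars.isalpha c = true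
      · simp [goodNumLoopA, hd, ha]
      · simp [goodNumLoopA, hd, ha, ih]

theorem goodNumLoopA_eq_scanB (l : List Char) :
    goodNumLoopA l 0 = goodNumScanB l := by
  induction l with
  | nil => rfl
  | cons c rest ih =>
    by_cases hd : PySem.Chars.isdigit c = true
    · by_cases h0 : c = '0'
      · subst h0
        simp [goodNumLoopA, goodNumScanB, show PySem.Chars.isdigit '0' = true from by decide]
      · simp [goodNumLoopA, goodNumScanB, hd, h0, goodNumLoopA_pos]
    · have h0 : c ≠ '0' := by
        intro h; subst h; simp [PySem.Chars.isdigit] at hd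
      by_cases ha : PySem.Chars.isalpha c = true
      · simp [goodNumLoopA, goodNumScanB, hd, h0, ha, ih]
      · simp [goodNumLoopA, goodNumScanB, hd, h0, ha, ih]

-- ===== VERDICT (by name: the statement is the Claim_ definition above) =====
theorem good_num_spec : Claim_equal_good_num := by
  intro s _
  unfold Spec_good_num good_num good_num_alt
  exact goodNumLoopA_eq_scanB s.toList
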